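-- pv_equiv track=rewrite | github.com/wxsh-boltz/ppi_data | antibodies/scripts/build_test_set/0_calc_edit_distance_for_peptides.py | custom_edit_distance
-- ===== SOURCE A (Python) =====
-- def custom_edit_distance(s1, s2, wildcard='X'):
--     len1, len2 = len(s1), len(s2)
--     dp = [[0] * (len2 + 1) for _ in range(len1 + 1)]
--
--     for i in range(len1 + 1):
--         dp[i][0] = i
--     for j in range(len2 + 1):
--         dp[0][j] = j
--
--     for i in range(1, len1 + 1):
--         for j in range(1, len2 + 1):
--             c1, c2 = s1[i - 1], s2[j - 1]
--             if c1 == c2 or c1 == wildcard or c2 == wildcard: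
--                 cost = 0
--             else:
--                 cost = 1
--             dp[i][j] = min(
--                 dp[i - 1][j] + 1,      # deletion
--                 dp[i][j - 1] + 1,      # insertion
--                 dp[i - 1][j - 1] + cost  # substitution
--             )
--
--     return dp[len1][len2]
-- ===== SOURCE B (Python) =====
-- def custom_edit_distance(s1, s2, wildcard='X'):
--     memo = {}
--
--     def rec(i, j):
--         if (i, j) in memo:
--             return memo[(i, j)]
--         if i == 0:
--             res = j
--         elif j == 0:
--             res = i
--         else:
--             c1, c2 = s1[i - 1], s2[j - 1]
--             cost = 0 if (c1 == c2 or c1 == wildcard or c2 == wildcard) else 1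
--             res = min(rec(i - 1, j) + 1, rec(i, j - 1) + 1, rec(i - 1, j - 1) + cost)
--         memo[(i, j)] = res
--         return res
--
--     return rec(len(s1), len(s2))
-- ===== Notes on version B (the rewrite author's own statement) =====
-- stated objective: alternative
-- what changed: Replaced A's bottom-up 2D DP table (nested index loops filling dp[i][j]) by top-down memoized recursion: a helper rec(i,j) with a dict cache keyed on (i,j), computing only the cells the recursion actually demands.
import Mathlib
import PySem

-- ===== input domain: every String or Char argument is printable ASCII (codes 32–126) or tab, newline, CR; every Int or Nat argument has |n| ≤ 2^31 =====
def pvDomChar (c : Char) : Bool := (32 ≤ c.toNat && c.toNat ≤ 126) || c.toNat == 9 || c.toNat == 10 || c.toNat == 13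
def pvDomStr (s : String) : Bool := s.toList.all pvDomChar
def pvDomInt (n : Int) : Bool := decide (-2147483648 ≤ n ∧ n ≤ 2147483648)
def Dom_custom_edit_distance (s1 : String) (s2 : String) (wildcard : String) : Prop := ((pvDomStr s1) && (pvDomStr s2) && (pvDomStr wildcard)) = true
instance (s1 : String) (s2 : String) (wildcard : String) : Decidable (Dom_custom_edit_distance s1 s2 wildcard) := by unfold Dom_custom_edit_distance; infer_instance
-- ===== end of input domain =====

-- B replaces A's bottom-up 2-D DP table with top-down memoized recursion (dict cache keyed on (i,j)); same value, different decomposition.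

-- ===== PORT A =====
-- shared cost test: Python's "c1 == c2 or c1 == wildcard or c2 == wildcard",
-- where c1, c2 are one-character strings compared against the string `wildcard`
def pvCost (wildcard : String) (c1 c2 : Char) : Int :=
  if c1 = c2 ∨ String.ofList [c1] = wildcard ∨ String.ofList [c2] = wildcard then 0 else 1

-- literal port of A's 2-D table algorithm; all indices are Nat and provably in
-- range, so plain `List.getD`/`List.set` is exact for Python's indexing/assignment,
-- and `range(1, len+1)` is ported as `List.range len` with i := i0+1 (same sequence)
def custom_edit_distance (s1 : String) (s2 : String) (wildcard : String) : Int :=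
  let cs1 := s1.toList
  let cs2 := s2.toList
  let len1 := cs1.length
  let len2 := cs2.length
  let dp0 : List (List Int) := (List.range (len1 + 1)).map (fun _ => List.replicate (len2 + 1) 0)
  let dp1 := (List.range (len1 + 1)).foldl (fun dp i => dp.set i ((dp.getD i []).set 0 (Int.ofNat i))) dp0
  let dp2 := (List.range (len2 + 1)).foldl (fun dp j => dp.set 0 ((dp.getD 0 []).set j (Int.ofNat j))) dp1
  let dp3 := (List.range len1).foldl (fun dp i0 =>
      (List.range len2).foldl (fun dp j0 =>
        let i := i0 + 1
        let j := j0 + 1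
        let c1 := cs1.getD (i - 1) ' '
        let c2 := cs2.getD (j - 1) ' '
        let cost := pvCost wildcard c1 c2
        let v := min (min ((dp.getD (i - 1) []).getD j 0 + 1) ((dp.getD i []).getD (j - 1) 0 + 1))
                     ((dp.getD (i - 1) []).getD (j - 1) 0 + cost)
        dp.set i ((dp.getD i []).set j v)) dp) dp2
  (dp3.getD len1 []).getD len2 0

-- ===== PORT B =====
-- literal port of Source B's inner `rec(i, j)`: check the memo, base cases, otherwise
-- the three recursive calls in Python's evaluation order with the memo dict
-- threaded through; every call site has i, j ≥ 0 so Nat indices are exact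
def pvRec (cs1 cs2 : List Char) (wc : String) :
    Nat → Nat → PySem.Dict (Nat × Nat) Int → Int × PySem.Dict (Nat × Nat) Int
  | i, j, memo =>
    match memo.get? (i, j) with
    | some v => (v, memo)
    | none =>
      match i, j with
      | 0, j => ((Int.ofNat j), memo.insert (0, j) (Int.ofNat j))
      | i + 1, 0 => ((Int.ofNat (i + 1)), memo.insert (i + 1, 0) (Int.ofNat (i + 1)))
      | i + 1, j + 1 =>
        let cost := pvCost wc (cs1.getD i ' ') (cs2.getD j ' ')
        let r1 := pvRec cs1 cs2 wc i (j + 1) memo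
        let r2 := pvRec cs1 cs2 wc (i + 1) j r1.2
        let r3 := pvRec cs1 cs2 wc i j r2.2
        let res := min (min (r1.1 + 1) (r2.1 + 1)) (r3.1 + cost)
        (res, r3.2.insert (i + 1, j + 1) res)
  termination_by i j _ => (i, j)

-- literal port of Source B: `return rec(len(s1), len(s2))` starting from an empty memo
def custom_edit_distance_alt (s1 : String) (s2 : String) (wildcard : String) : Int :=
  (pvRec s1.toList s2.toList wildcard s1.toList.length s2.toList.length PySem.Dict.empty).1

-- ===== PRECONDITION & SPEC =====
def Spec_custom_edit_distance (s1 : String) (s2 : String) (wildcard : String) (out : Int) : Prop := out = custom_edit_distance_alt s1 s2 wildcard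
instance (s1 : String) (s2 : String) (wildcard : String) (out : Int) : Decidable (Spec_custom_edit_distance s1 s2 wildcard out) := by unfold Spec_custom_edit_distance; infer_instance

-- ===== CLAIM (what is proved, stated in full; the proofs are below) =====
def Claim_equal_custom_edit_distance : Prop := ∀ (s1 : String) (s2 : String) (wildcard : String), Dom_custom_edit_distance s1 s2 wildcard → Spec_custom_edit_distance s1 s2 wildcard (custom_edit_distance s1 s2 wildcard)

-- ===== LEMMAS AND PROOFS =====

-- the shared recurrence both programs compute: pvE i j = wildcard edit distance of s1[:i], s2[:j]
def pvE (cs1 cs2 : List Char) (wc : String) : Nat → Nat → Int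
  | 0, j => Int.ofNat j
  | i + 1, 0 => Int.ofNat (i + 1)
  | i + 1, j + 1 =>
      min (min (pvE cs1 cs2 wc i (j + 1) + 1) (pvE cs1 cs2 wc (i + 1) j + 1))
          (pvE cs1 cs2 wc i j + pvCost wc (cs1.getD i ' ') (cs2.getD j ' '))
  termination_by i j => (i, j)

-- ==== B side: the memoized recursion computes pvE ====

-- a memo is good if every entry holds the recurrence's value
def GoodMemo (cs1 cs2 : List Char) (wc : String) (m : PySem.Dict (Nat × Nat) Int) : Prop :=
  ∀ i j v, m.get? (i, j) = some v → v = pvE cs1 cs2 wc i j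

lemma goodMemo_insert (cs1 cs2 : List Char) (wc : String) (m : PySem.Dict (Nat × Nat) Int)
    (i j : Nat) (hm : GoodMemo cs1 cs2 wc m) :
    GoodMemo cs1 cs2 wc (m.insert (i, j) (pvE cs1 cs2 wc i j)) := by
  intro i' j' v hv
  rw [PySem.Dict.get?_insert] at hv
  by_cases h : (i', j') = ((i, j) : Nat × Nat)
  · rw [if_pos h] at hv
    obtain ⟨h1, h2⟩ := Prod.mk.injEq .. ▸ h
    cases hv; rw [h1, h2]
  · rw [if_neg h] at hv
    exact hm i' j' v hv

lemma pvRec_good (cs1 cs2 : List Char) (wc : String) :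
    ∀ (n i j : Nat) (m : PySem.Dict (Nat × Nat) Int), i + j ≤ n → GoodMemo cs1 cs2 wc m →
      (pvRec cs1 cs2 wc i j m).1 = pvE cs1 cs2 wc i j ∧
      GoodMemo cs1 cs2 wc (pvRec cs1 cs2 wc i j m).2 := by
  intro n
  induction n with
  | zero =>
      intro i j m hn hm
      have hi : i = 0 := by omega
      have hj : j = 0 := by omega
      subst hi; subst hj
      rw [pvRec.eq_def]; dsimp only
      cases hget : m.get? ((0, 0) : Nat × Nat) with
      | some v => exact ⟨hm 0 0 v hget, hm⟩
      | none =>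
          exact ⟨by simp [pvE], by simpa [pvE] using goodMemo_insert cs1 cs2 wc m 0 0 hm⟩
  | succ n ih =>
      intro i j m hn hm
      rw [pvRec.eq_def]; dsimp only
      cases hget : m.get? ((i, j) : Nat × Nat) with
      | some v => exact ⟨hm i j v hget, hm⟩
      | none =>
          cases i with
          | zero =>
              exact ⟨by simp [pvE], by simpa [pvE] using goodMemo_insert cs1 cs2 wc m 0 j hm⟩
          | succ i =>
              cases j with
              | zero =>
                  exact ⟨by simp [pvE], by simpa [pvE] using goodMemo_insert cs1 cs2 wc m (i + 1) 0 hm⟩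
              | succ j =>
                  obtain ⟨h1v, h1m⟩ := ih i (j + 1) m (by omega) hm
                  obtain ⟨h2v, h2m⟩ := ih (i + 1) j _ (by omega) h1m
                  obtain ⟨h3v, h3m⟩ := ih i j _ (by omega) h2m
                  constructor
                  · show min (min ((pvRec cs1 cs2 wc i (j+1) m).1 + 1)
                        ((pvRec cs1 cs2 wc (i+1) j (pvRec cs1 cs2 wc i (j+1) m).2).1 + 1))
                        ((pvRec cs1 cs2 wc i j (pvRec cs1 cs2 wc (i+1) j (pvRec cs1 cs2 wc i (j+1) m).2).2).1
                          + pvCost wc (cs1.getD i ' ') (cs2.getD j ' '))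
                      = pvE cs1 cs2 wc (i + 1) (j + 1)
                    rw [h1v, h2v, h3v, pvE]
                  · have hval : min (min ((pvRec cs1 cs2 wc i (j+1) m).1 + 1)
                        ((pvRec cs1 cs2 wc (i+1) j (pvRec cs1 cs2 wc i (j+1) m).2).1 + 1))
                        ((pvRec cs1 cs2 wc i j (pvRec cs1 cs2 wc (i+1) j (pvRec cs1 cs2 wc i (j+1) m).2).2).1
                          + pvCost wc (cs1.getD i ' ') (cs2.getD j ' '))
                      = pvE cs1 cs2 wc (i + 1) (j + 1) := by
                      rw [h1v, h2v, h3v, pvE]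
                    show GoodMemo cs1 cs2 wc
                      ((pvRec cs1 cs2 wc i j (pvRec cs1 cs2 wc (i+1) j (pvRec cs1 cs2 wc i (j+1) m).2).2).2.insert
                        (i + 1, j + 1)
                        (min (min ((pvRec cs1 cs2 wc i (j+1) m).1 + 1)
                          ((pvRec cs1 cs2 wc (i+1) j (pvRec cs1 cs2 wc i (j+1) m).2).1 + 1))
                          ((pvRec cs1 cs2 wc i j (pvRec cs1 cs2 wc (i+1) j (pvRec cs1 cs2 wc i (j+1) m).2).2).1
                            + pvCost wc (cs1.getD i ' ') (cs2.getD j ' '))))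
                    rw [hval]
                    exact goodMemo_insert cs1 cs2 wc _ (i + 1) (j + 1) h3m

-- ==== A side: the filled table holds the pvE values ====

-- the row recurrence A's inner loop implements: gRow … k = value of cell (row, column k)
def gRow (c1 : Char) (wc : String) (cs2 : List Char) (prev : List Int) (i0 : Int) : Nat → Int
  | 0 => i0
  | k + 1 => min (min (prev.getD (k + 1) 0 + 1) (gRow c1 wc cs2 prev i0 k + 1))
                 (prev.getD k 0 + pvCost wc c1 (cs2.getD k ' '))

-- the sequence of rows of the DP table
def rowR (wc : String) (cs1 cs2 : List Char) : Nat → List Int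
  | 0 => (List.range (cs2.length + 1)).map Int.ofNat
  | i + 1 => (List.range (cs2.length + 1)).map (gRow (cs1.getD i ' ') wc cs2 (rowR wc cs1 cs2 i) (Int.ofNat (i + 1)))

lemma rowR_length (wc : String) (cs1 cs2 : List Char) (i : Nat) :
    (rowR wc cs1 cs2 i).length = cs2.length + 1 := by
  cases i <;> simp [rowR]

-- small List.getD helpers
lemma getD_set_eq {α} (l : List α) (i : Nat) (a d : α) (h : i < l.length) :
    (l.set i a).getD i d = a := by
  simp [List.getD_eq_getElem?_getD, List.getElem?_set_self h]

lemma getD_set_ne {α} (l : List α) (i j : Nat) (a d : α) (h : i ≠ j) :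
    (l.set i a).getD j d = l.getD j d := by
  simp [List.getD_eq_getElem?_getD, List.getElem?_set_ne h]

lemma getD_append_left {α} (l1 l2 : List α) (i : Nat) (d : α) (h : i < l1.length) :
    (l1 ++ l2).getD i d = l1.getD i d := by
  simp [List.getD_eq_getElem?_getD, List.getElem?_append_left h]

lemma set_append_len {α} (l1 : List α) (a b : α) (l2 : List α) :
    (l1 ++ a :: l2).set l1.length b = l1 ++ b :: l2 := by
  induction l1 with
  | nil => rfl
  | cons x xs ih => simp [ih]

-- generic getD over a mapped range
lemma getD_range_map' {b : Type} (f : Nat → b) (d : b) (n t : Nat) (h : t < n) :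
    (((List.range n).map f).getD t d) = f t := by
  rw [List.getD_eq_getElem?_getD]
  simp [h]

-- the zeta-reduced inner-loop body of port A (row i0+1, column j0+1)
def stepInner (wc : String) (cs1 cs2 : List Char) (i0 : Nat) (dp : List (List Int)) (j0 : Nat) : List (List Int) :=
  dp.set (i0+1) ((dp.getD (i0+1) []).set (j0+1)
    (min (min ((dp.getD i0 []).getD (j0+1) 0 + 1) ((dp.getD (i0+1) []).getD j0 0 + 1))
         ((dp.getD i0 []).getD j0 0 + pvCost wc (cs1.getD i0 ' ') (cs2.getD j0 ' '))))

-- A's inner loop fills row i0+1 with the gRow values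
lemma innerA (wc : String) (cs1 cs2 : List Char) (i0 : Nat)
    (hi : i0 + 1 ≤ cs1.length) :
    ∀ (k : Nat) (dp : List (List Int)), k ≤ cs2.length ->
    dp.length = cs1.length + 1 ->
    dp.getD i0 [] = rowR wc cs1 cs2 i0 ->
    dp.getD (i0+1) [] = Int.ofNat (i0+1) :: List.replicate cs2.length 0 ->
    let g := gRow (cs1.getD i0 ' ') wc cs2 (rowR wc cs1 cs2 i0) (Int.ofNat (i0+1))
    let dp' := (List.range k).foldl (stepInner wc cs1 cs2 i0) dp
    dp'.length = cs1.length + 1 ∧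
    (∀ t, t ≠ i0+1 → dp'.getD t [] = dp.getD t []) ∧
    dp'.getD (i0+1) [] = (List.range (k+1)).map g ++ List.replicate (cs2.length - k) 0 := by
  intro k
  induction k with
  | zero =>
      intro dp hk hlen hprev hcur
      refine ⟨hlen, fun t ht => rfl, ?_⟩
      simpa [gRow] using hcur
  | succ k ih =>
      intro dp hk hlen hprev hcur
      obtain ⟨ihlen, ihother, ihrow⟩ := ih dp (by omega) hlen hprev hcur
      set g := gRow (cs1.getD i0 ' ') wc cs2 (rowR wc cs1 cs2 i0) (Int.ofNat (i0+1)) with hgdef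
      set dpk := (List.range k).foldl (stepInner wc cs1 cs2 i0) dp with hdpk
      have hfold : (List.range (k+1)).foldl (stepInner wc cs1 cs2 i0) dp
          = stepInner wc cs1 cs2 i0 dpk k := by
        rw [List.range_succ, List.foldl_append]; rfl
      have hne : i0 ≠ i0 + 1 := by omega
      have hprevk : dpk.getD i0 [] = rowR wc cs1 cs2 i0 := by rw [ihother i0 hne, hprev]
      have hrowlen : (rowR wc cs1 cs2 i0).length = cs2.length + 1 := rowR_length ..
      -- the three reads
      have hread_del : (dpk.getD i0 []).getD (k+1) 0 = (rowR wc cs1 cs2 i0).getD (k+1) 0 := by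
        rw [hprevk]
      have hlenpref : ((List.range (k+1)).map g).length = k + 1 := by simp
      have hread_ins : (dpk.getD (i0+1) []).getD k 0 = g k := by
        rw [ihrow, getD_append_left _ _ _ _ (by simp), getD_range_map' g 0 (k+1) k (by omega)]
      have hstep : min (min ((dpk.getD i0 []).getD (k+1) 0 + 1) ((dpk.getD (i0+1) []).getD k 0 + 1))
          ((dpk.getD i0 []).getD k 0 + pvCost wc (cs1.getD i0 ' ') (cs2.getD k ' ')) = g (k+1) := by
        rw [hread_del, hread_ins, hprevk, hgdef]
        rfl
      have hsetrow : ((dpk.getD (i0+1) []).set (k+1) (g (k+1)))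
          = (List.range (k+2)).map g ++ List.replicate (cs2.length - (k+1)) 0 := by
        rw [ihrow]
        have hrep : List.replicate (cs2.length - k) (0:Int) = 0 :: List.replicate (cs2.length - (k+1)) 0 := by
          have : cs2.length - k = (cs2.length - (k+1)) + 1 := by omega
          rw [this, List.replicate_succ]
        rw [hrep]
        have := set_append_len ((List.range (k+1)).map g) (0:Int) (g (k+1)) (List.replicate (cs2.length - (k+1)) 0)
        rw [hlenpref] at this
        rw [this]
        rw [List.range_succ (n := k+1), List.map_append, List.map_singleton, List.append_assoc]
        rfl
      have hlt : i0 + 1 < dpk.length := by omega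
      refine ⟨?_, ?_, ?_⟩
      · rw [hfold]; simp [stepInner, ihlen]
      · intro t ht
        rw [hfold]
        show (dpk.set (i0+1) _).getD t [] = _
        rw [getD_set_ne _ _ _ _ _ (fun h => ht h.symm), ihother t ht]
      · rw [hfold]
        show (dpk.set (i0+1) _).getD (i0+1) [] = _
        rw [hstep, getD_set_eq _ _ _ _ hlt, hsetrow]

-- first init loop: dp[i][0] = i
lemma init1 (n m : Nat) :
    ∀ (k : Nat) (dp : List (List Int)), k ≤ n + 1 →
    dp.length = n + 1 →
    (∀ t, t < n + 1 → dp.getD t [] = List.replicate (m+1) 0) →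
    let dp' := (List.range k).foldl (fun dp i => dp.set i ((dp.getD i []).set 0 (Int.ofNat i))) dp
    dp'.length = n + 1 ∧
    (∀ t, t < k → dp'.getD t [] = Int.ofNat t :: List.replicate m 0) ∧
    (∀ t, k ≤ t → t < n + 1 → dp'.getD t [] = List.replicate (m+1) 0) := by
  intro k
  induction k with
  | zero =>
      intro dp hk hlen h0
      exact ⟨hlen, fun t ht => absurd ht (by omega), fun t _ ht => h0 t ht⟩
  | succ k ih =>
      intro dp hk hlen h0
      obtain ⟨ihlen, ihlow, ihhigh⟩ := ih dp (by omega) hlen h0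
      set dpk := (List.range k).foldl (fun dp i => dp.set i ((dp.getD i []).set 0 (Int.ofNat i))) dp with hdpk
      have hfold : (List.range (k+1)).foldl (fun dp i => dp.set i ((dp.getD i []).set 0 (Int.ofNat i))) dp
          = dpk.set k ((dpk.getD k []).set 0 (Int.ofNat k)) := by
        rw [List.range_succ, List.foldl_append]; rfl
      have hklt : k < dpk.length := by omega
      have hrowk : (dpk.getD k []).set 0 (Int.ofNat k) = Int.ofNat k :: List.replicate m 0 := by
        rw [ihhigh k (by omega) (by omega), List.replicate_succ]; rfl
      refine ⟨?_, ?_, ?_⟩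
      · rw [hfold]; simp [ihlen]
      · intro t ht
        rw [hfold]
        by_cases hteq : t = k
        · subst hteq; rw [getD_set_eq _ _ _ _ hklt, hrowk]
        · rw [getD_set_ne _ _ _ _ _ (fun h => hteq h.symm)]; exact ihlow t (by omega)
      · intro t ht1 ht2
        rw [hfold, getD_set_ne _ _ _ _ _ (by omega)]
        exact ihhigh t (by omega) ht2

-- second init loop: dp[0][j] = j
lemma init2 (n m : Nat) :
    ∀ (k : Nat) (dp : List (List Int)), k ≤ m + 1 →
    dp.length = n + 1 →
    dp.getD 0 [] = Int.ofNat 0 :: List.replicate m 0 →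
    let dp' := (List.range k).foldl (fun dp j => dp.set 0 ((dp.getD 0 []).set j (Int.ofNat j))) dp
    dp'.length = n + 1 ∧
    (∀ t, t ≠ 0 → dp'.getD t [] = dp.getD t []) ∧
    dp'.getD 0 [] = (List.range k).map Int.ofNat ++ List.replicate (m + 1 - k) 0 := by
  intro k
  induction k with
  | zero =>
      intro dp hk hlen h0
      refine ⟨hlen, fun t ht => rfl, ?_⟩
      show dp.getD 0 [] = _
      rw [h0]; simp [List.replicate_succ]
  | succ k ih =>
      intro dp hk hlen h0
      obtain ⟨ihlen, ihother, ihrow⟩ := ih dp (by omega) hlen h0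
      set dpk := (List.range k).foldl (fun dp j => dp.set 0 ((dp.getD 0 []).set j (Int.ofNat j))) dp with hdpk
      have hfold : (List.range (k+1)).foldl (fun dp j => dp.set 0 ((dp.getD 0 []).set j (Int.ofNat j))) dp
          = dpk.set 0 ((dpk.getD 0 []).set k (Int.ofNat k)) := by
        rw [List.range_succ, List.foldl_append]; rfl
      have h0lt : 0 < dpk.length := by omega
      have hrow : (dpk.getD 0 []).set k (Int.ofNat k)
          = (List.range (k+1)).map Int.ofNat ++ List.replicate (m + 1 - (k+1)) 0 := by
        rw [ihrow]
        have hrep : List.replicate (m + 1 - k) (0:Int) = 0 :: List.replicate (m + 1 - (k+1)) 0 := by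
          have : m + 1 - k = (m + 1 - (k+1)) + 1 := by omega
          rw [this, List.replicate_succ]
        rw [hrep]
        have hlenpref : ((List.range k).map (Int.ofNat)).length = k := by simp
        have := set_append_len ((List.range k).map Int.ofNat) (0:Int) (Int.ofNat k) (List.replicate (m + 1 - (k+1)) 0)
        rw [hlenpref] at this
        rw [this, List.range_succ, List.map_append, List.map_singleton, List.append_assoc]
        rfl
      refine ⟨?_, ?_, ?_⟩
      · rw [hfold]; simp [ihlen]
      · intro t ht
        rw [hfold, getD_set_ne _ _ _ _ _ (fun h => ht h.symm)]
        exact ihother t ht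
      · rw [hfold, getD_set_eq _ _ _ _ h0lt, hrow]

-- A's outer loop: after all rows are processed, row len1 is rowR len1
lemma outerA (wc : String) (cs1 cs2 : List Char) :
    ∀ (r k : Nat) (dp : List (List Int)), r = cs1.length - k → k ≤ cs1.length →
    dp.length = cs1.length + 1 →
    (∀ t, t ≤ k → dp.getD t [] = rowR wc cs1 cs2 t) →
    (∀ t, k < t → t ≤ cs1.length → dp.getD t [] = Int.ofNat t :: List.replicate cs2.length 0) →
    ((List.range' k r).foldl (fun dp i0 => (List.range cs2.length).foldl (stepInner wc cs1 cs2 i0) dp) dp).getD cs1.length []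
      = rowR wc cs1 cs2 cs1.length := by
  intro r
  induction r with
  | zero =>
      intro k dp hr hk hlen h1 h2
      have : k = cs1.length := by omega
      subst this
      simpa using h1 cs1.length le_rfl
  | succ r ih =>
      intro k dp hr hk hlen h1 h2
      have hklt : k < cs1.length := by omega
      rw [List.range'_succ, List.foldl_cons]
      obtain ⟨plen, pother, prow⟩ := innerA wc cs1 cs2 k (by omega) cs2.length dp le_rfl hlen
        (h1 k le_rfl) (h2 (k+1) (by omega) (by omega))
      set dp' := (List.range cs2.length).foldl (stepInner wc cs1 cs2 k) dp with hdp'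
      have hrownew : dp'.getD (k+1) [] = rowR wc cs1 cs2 (k+1) := by
        rw [prow]
        simp [rowR]
      refine ih (k+1) dp' (by omega) (by omega) plen ?_ ?_
      · intro t ht
        by_cases hteq : t = k + 1
        · subst hteq; exact hrownew
        · rw [pother t hteq]; exact h1 t (by omega)
      · intro t ht1 ht2
        rw [pother t (by omega)]
        exact h2 t (by omega) ht2

-- ==== the two characterisations meet: rowR entries are pvE values ====

lemma gRow_E (wc : String) (cs1 cs2 : List Char) (i : Nat) (prev : List Int)
    (hprev : ∀ j, j ≤ cs2.length → prev.getD j 0 = pvE cs1 cs2 wc i j) :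
    ∀ k, k ≤ cs2.length →
      gRow (cs1.getD i ' ') wc cs2 prev (Int.ofNat (i + 1)) k = pvE cs1 cs2 wc (i + 1) k := by
  intro k
  induction k with
  | zero => intro _; simp [gRow, pvE]
  | succ k ih =>
      intro hk
      rw [gRow, ih (by omega), hprev (k+1) hk, hprev k (by omega), pvE]

lemma rowR_E (wc : String) (cs1 cs2 : List Char) :
    ∀ i j, j ≤ cs2.length → (rowR wc cs1 cs2 i).getD j 0 = pvE cs1 cs2 wc i j := by
  intro i
  induction i with
  | zero =>
      intro j hj
      rw [rowR, getD_range_map' _ _ _ _ (by omega)]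
      simp [pvE]
  | succ i ih =>
      intro j hj
      rw [rowR, getD_range_map' _ _ _ _ (by omega)]
      exact gRow_E wc cs1 cs2 i _ ih j hj

-- ===== VERDICT (by name: the statement is the Claim_ definition above) =====
theorem custom_edit_distance_spec : Claim_equal_custom_edit_distance := by
  unfold Claim_equal_custom_edit_distance
  intro s1 s2 wildcard _
  unfold Spec_custom_edit_distance
  -- B side: the memoized recursion from the empty memo computes pvE
  have hGoodEmpty : GoodMemo s1.toList s2.toList wildcard PySem.Dict.empty := by
    intro i j v hv
    rw [PySem.Dict.get?_empty] at hv
    cases hv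
  have hB : custom_edit_distance_alt s1 s2 wildcard
      = pvE s1.toList s2.toList wildcard s1.toList.length s2.toList.length := by
    unfold custom_edit_distance_alt
    exact (pvRec_good s1.toList s2.toList wildcard (s1.toList.length + s2.toList.length)
      s1.toList.length s2.toList.length PySem.Dict.empty le_rfl hGoodEmpty).1
  rw [hB]
  -- A side
  simp only [custom_edit_distance]
  have hstep : (fun (dp : List (List Int)) (i0 : Nat) =>
        (List.range s2.toList.length).foldl (fun dp j0 =>
          dp.set (i0+1) ((dp.getD (i0+1) []).set (j0+1)
            (min (min ((dp.getD (i0+1-1) []).getD (j0+1) 0 + 1) ((dp.getD (i0+1) []).getD (j0+1-1) 0 + 1))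
                 ((dp.getD (i0+1-1) []).getD (j0+1-1) 0
                    + pvCost wildcard (s1.toList.getD (i0+1-1) ' ') (s2.toList.getD (j0+1-1) ' ')))))
          dp)
      = (fun (dp : List (List Int)) (i0 : Nat) =>
          (List.range s2.toList.length).foldl (stepInner wildcard s1.toList s2.toList i0) dp) := by
    funext dp i0
    congr 1
  rw [hstep]
  have hdp0len : ((List.range (s1.toList.length + 1)).map
      (fun _ => List.replicate (s2.toList.length + 1) (0:Int))).length = s1.toList.length + 1 := by simp
  have hdp0row : ∀ t, t < s1.toList.length + 1 →
      ((List.range (s1.toList.length + 1)).map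
        (fun _ => List.replicate (s2.toList.length + 1) (0:Int))).getD t [] = List.replicate (s2.toList.length + 1) 0 := by
    intro t ht
    exact getD_range_map' (fun _ => List.replicate (s2.toList.length + 1) (0:Int)) [] _ t ht
  obtain ⟨h1len, h1low, h1high⟩ :=
    init1 s1.toList.length s2.toList.length (s1.toList.length + 1) _ le_rfl hdp0len hdp0row
  obtain ⟨h2len, h2other, h2row⟩ :=
    init2 s1.toList.length s2.toList.length (s2.toList.length + 1) _ le_rfl h1len (h1low 0 (by omega))
  have h2row' : (((List.range (s2.toList.length + 1)).foldl
        (fun dp j => dp.set 0 ((dp.getD 0 []).set j (Int.ofNat j)))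
        ((List.range (s1.toList.length + 1)).foldl
          (fun dp i => dp.set i ((dp.getD i []).set 0 (Int.ofNat i)))
          ((List.range (s1.toList.length + 1)).map
            (fun _ => List.replicate (s2.toList.length + 1) (0:Int)))))).getD 0 []
      = rowR wildcard s1.toList s2.toList 0 := by
    rw [h2row]; simp [rowR]
  rw [show List.range s1.toList.length = List.range' 0 s1.toList.length from List.range_eq_range']
  rw [outerA wildcard s1.toList s2.toList s1.toList.length 0 _ (by omega) (by omega) h2len
      (fun t ht => by
        have : t = 0 := by omega
        subst this; exact h2row')
      (fun t ht1 ht2 => by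
        rw [h2other t (by omega)]
        exact h1low t (by omega))]
  exact rowR_E wildcard s1.toList s2.toList s1.toList.length s2.toList.length le_rfl
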